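-- pv_equiv track=rewrite | github.com/saran-raj-247/Python | week 8/week 8.3.py | uncommon_words
-- ===== SOURCE A (Python) =====
-- def uncommon_words(s1, s2):
--     # Tokenize the sentences
--     words1 = s1.split()
--     words2 = s2.split()
--
--     # Create dictionaries to store word frequencies
--     freq1 = {}
--     freq2 = {}
--
--     # Count word frequencies in s1
--     for word in words1:
--         freq1[word] = freq1.get(word, 0) + 1
--
--     # Count word frequencies in s2
--     for word in words2:
--         freq2[word] = freq2.get(word, 0) + 1
--
--     # Find uncommon words
--     uncommon = []
--     for word, count in freq1.items():
--         if count == 1 and word not in freq2: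
--             uncommon.append(word)
--
--     for word, count in freq2.items():
--         if count == 1 and word not in freq1:
--             uncommon.append(word)
--
--     # Join uncommon words into a space-separated string
--     result = " ".join(uncommon)
--     return result
-- ===== SOURCE B (Python) =====
-- def uncommon_words(s1, s2):
--     counts = {}
--     for word in s1.split() + s2.split():
--         counts[word] = counts.get(word, 0) + 1
--     return " ".join([w for w, c in counts.items() if c == 1])
-- ===== Notes on version B (the rewrite author's own statement) =====
-- stated objective: simpler
-- what changed: Replaces A's two per-sentence frequency dicts plus two cross-membership selection passes with ONE combined counter over s1's words then s2's words and a single count==1 filter (total count 1 iff the word occurs once in exactly one sentence; counting s1 first preserves A's output order).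
import Mathlib
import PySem

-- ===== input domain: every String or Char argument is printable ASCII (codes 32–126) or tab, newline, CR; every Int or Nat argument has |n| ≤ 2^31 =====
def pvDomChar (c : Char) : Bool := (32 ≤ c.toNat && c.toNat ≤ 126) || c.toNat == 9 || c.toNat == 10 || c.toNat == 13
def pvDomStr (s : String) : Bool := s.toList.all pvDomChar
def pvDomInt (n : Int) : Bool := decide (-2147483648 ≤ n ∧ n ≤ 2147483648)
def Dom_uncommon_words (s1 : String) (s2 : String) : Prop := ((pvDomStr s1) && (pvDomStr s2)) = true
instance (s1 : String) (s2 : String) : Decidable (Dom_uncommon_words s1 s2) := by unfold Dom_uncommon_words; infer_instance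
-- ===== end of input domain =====

-- ===== PORT A =====
-- B replaces A's two per-sentence counters + cross-membership passes with one combined counter and a single count==1 filter (same output).
def uncommon_words (s1 : String) (s2 : String) : String :=
  let words1 := PySem.Str.split₀ s1
  let words2 := PySem.Str.split₀ s2
  let freq1 := words1.foldl (fun d word => d.insert word (d.getD word 0 + 1)) (PySem.Dict.empty : PySem.Dict String Int)
  let freq2 := words2.foldl (fun d word => d.insert word (d.getD word 0 + 1)) (PySem.Dict.empty : PySem.Dict String Int)
  let uncommon : List String :=
    freq1.items.foldl (fun acc wc => if wc.2 == 1 && !(freq2.contains wc.1) then acc ++ [wc.1] else acc) []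
  let uncommon :=
    freq2.items.foldl (fun acc wc => if wc.2 == 1 && !(freq1.contains wc.1) then acc ++ [wc.1] else acc) uncommon
  PySem.Str.join " " uncommon

-- ===== PORT B =====
def uncommon_words_alt (s1 : String) (s2 : String) : String :=
  let counts := (PySem.Str.split₀ s1 ++ PySem.Str.split₀ s2).foldl
      (fun d word => d.insert word (d.getD word 0 + 1)) (PySem.Dict.empty : PySem.Dict String Int)
  PySem.Str.join " " ((counts.items.filter (fun wc => wc.2 == 1)).map Prod.fst)

-- ===== PRECONDITION & SPEC =====
def Spec_uncommon_words (s1 : String) (s2 : String) (out : String) : Prop := out = uncommon_words_alt s1 s2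
instance (s1 : String) (s2 : String) (out : String) : Decidable (Spec_uncommon_words s1 s2 out) := by unfold Spec_uncommon_words; infer_instance

-- ===== CLAIM (what is proved, stated in full; the proofs are below) =====
def Claim_equal_uncommon_words : Prop := ∀ (s1 : String) (s2 : String), Dom_uncommon_words s1 s2 → Spec_uncommon_words s1 s2 (uncommon_words s1 s2)

-- ===== LEMMAS AND PROOFS =====

-- Core list fact: A's two selection passes concatenated equal B's single count==1 filter
-- over the combined first-occurrence list.
theorem uncommon_core (w1 w2 : List String) :
    List.filter (fun k => ((w1.count k : Int) == 1) && !(w2.contains k)) (PySem.Set.ofList w1)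
      ++ List.filter (fun k => ((w2.count k : Int) == 1) && !(w1.contains k)) (PySem.Set.ofList w2)
    = List.filter (fun k => (((w1 ++ w2).count k : Int) == 1)) (PySem.Set.ofList (w1 ++ w2)) := by
  rw [PySem.Set.ofList_append, PySem.Set.update_eq_append_filter, List.filter_append,
    List.filter_filter]
  congr 1
  · apply List.filter_congr
    intro x hx
    have hx1 : x ∈ w1 := by simpa using hx
    have h1 : 0 < w1.count x := List.count_pos_iff.2 hx1
    rw [Bool.eq_iff_iff]
    simp only [Bool.and_eq_true, Bool.not_eq_true', beq_iff_eq, List.count_append,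
      List.contains_eq_mem, decide_eq_false_iff_not, Nat.cast_add, ← List.count_eq_zero]
    omega
  · apply List.filter_congr
    intro x hx
    rw [Bool.eq_iff_iff]
    simp only [Bool.and_eq_true, Bool.not_eq_true', beq_iff_eq, List.count_append,
      List.contains_eq_mem, PySem.Set.contains_eq_listContains, PySem.Set.mem_ofList,
      decide_eq_false_iff_not, Nat.cast_add, ← List.count_eq_zero]
    omega

-- ===== VERDICT (by name: the statement is the Claim_ definition above) =====
theorem uncommon_words_spec : Claim_equal_uncommon_words := by
  intro s1 s2 _
  unfold Spec_uncommon_words uncommon_words uncommon_words_alt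
  simp only [PySem.Dict.foldl_insert_getD_add_one_eq_counter,
    PySem.List.foldl_append_if (f := Prod.fst), PySem.Dict.items_counter,
    List.filter_map, List.map_map, List.nil_append, PySem.Dict.contains_counter,
    Function.comp_def]
  rw [← uncommon_core (PySem.Str.split₀ s1) (PySem.Str.split₀ s2)]
  simp
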